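-- pv_equiv track=rewrite | github.com/herywang/MLAlgorithm | graph/top_sort.py | event_latest_time
-- ===== SOURCE A (Python) =====
-- import copy
--
-- def event_latest_time(Graph, topseq, eelast):
--     tmp_topseq = copy.deepcopy(topseq)
--     el = dict((e, eelast) for e in tmp_topseq)
--     for i in range(len(topseq)-1, -1, -1):
--         k = topseq[i]
--         for key, value in Graph.items():
--             if k in value.keys():
--                 if el[k] - Graph[key][k] < el[key]:
--                     el[key] = el[k] - Graph[key][k]
--     return el
-- ===== SOURCE B (Python) =====
-- def event_latest_time(Graph, topseq, eelast):
--     pred = {}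
--     for u, succs in Graph.items():
--         for v, w in succs.items():
--             pred.setdefault(v, []).append((u, w))
--     el = dict((e, eelast) for e in topseq)
--     for k in reversed(topseq):
--         for u, w in pred.get(k, ()):
--             nv = el[k] - w
--             if nv < el[u]:
--                 el[u] = nv
--     return el
-- ===== Notes on version B (the rewrite author's own statement) =====
-- stated objective: faster
-- what changed: B builds a reverse-adjacency (predecessor) map once and, for each node of topseq, relaxes only its incoming edges, instead of A's rescan of every Graph entry for every topseq element.
import Mathlib
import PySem

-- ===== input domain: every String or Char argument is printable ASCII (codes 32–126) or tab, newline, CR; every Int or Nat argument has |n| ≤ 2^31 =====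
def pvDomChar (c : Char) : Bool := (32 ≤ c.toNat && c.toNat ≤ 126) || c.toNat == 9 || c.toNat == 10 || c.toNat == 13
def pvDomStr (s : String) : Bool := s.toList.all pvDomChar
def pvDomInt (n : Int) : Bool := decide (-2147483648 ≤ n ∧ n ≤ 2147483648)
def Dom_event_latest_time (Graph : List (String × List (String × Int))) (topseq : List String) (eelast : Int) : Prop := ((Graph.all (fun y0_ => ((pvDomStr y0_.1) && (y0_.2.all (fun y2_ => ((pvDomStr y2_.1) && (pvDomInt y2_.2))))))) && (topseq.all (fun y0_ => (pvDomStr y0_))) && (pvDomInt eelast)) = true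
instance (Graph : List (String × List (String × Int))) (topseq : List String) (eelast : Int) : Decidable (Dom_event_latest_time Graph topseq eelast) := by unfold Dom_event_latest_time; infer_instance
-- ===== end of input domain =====

-- B replaces A's rescan of the whole Graph for every topseq element by a predecessor map built
-- once, relaxing only each node's incoming edges (objective: faster, asymptotically fewer edge visits).
-- Both Python dict parameters/results follow the assoc-list convention (PySem.Dict.ofList collapses
-- duplicate keys exactly as a Python dict literal does).

-- shared helper: el = dict((e, eelast) for e in topseq)  (both Pythons build el this way)
def pvInitEl (topseq : List String) (eelast : Int) : PySem.Dict String Int :=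
  topseq.foldl (fun d e => PySem.Dict.insert d e eelast) PySem.Dict.empty

-- ===== PORT A =====
-- 'for i in range(len(topseq)-1, -1, -1): k = topseq[i]' iterates topseq back to front
-- (every index is in range), ported as a fold over topseq.reverse.
def event_latest_time (Graph : List (String × List (String × Int))) (topseq : List String) (eelast : Int) : List (String × Int) :=
  let G : PySem.Dict String (List (String × Int)) := PySem.Dict.ofList Graph
  let elF := topseq.reverse.foldl (fun el k =>
      G.items.foldl (fun el p =>
        if (PySem.Dict.get? (PySem.Dict.ofList p.2) k).isSome then
          -- Graph[key][k]; el[k] and el[key] are present on Pre_ (getD's default is never used there)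
          let w := (PySem.Dict.get? (PySem.Dict.ofList ((PySem.Dict.get? G p.1).getD [])) k).getD 0
          if PySem.Dict.getD el k 0 - w < PySem.Dict.getD el p.1 0 then
            PySem.Dict.insert el p.1 (PySem.Dict.getD el k 0 - w)
          else el
        else el) el) (pvInitEl topseq eelast)
  elF.items

-- ===== PORT B =====
-- relax one incoming edge (u, w) of k:  nv = el[k] - w; if nv < el[u]: el[u] = nv
def pvRelax (k : String) (el : PySem.Dict String Int) (uw : String × Int) : PySem.Dict String Int :=
  let nv := PySem.Dict.getD el k 0 - uw.2
  if nv < PySem.Dict.getD el uw.1 0 then PySem.Dict.insert el uw.1 nv else el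

-- pred = {}: for u, succs in Graph.items(): for v, w in succs.items(): pred.setdefault(v, []).append((u, w))
def pvPred (Graph : List (String × List (String × Int))) : PySem.Dict String (List (String × Int)) :=
  (PySem.Dict.ofList Graph).items.foldl (fun d p =>
    (PySem.Dict.ofList p.2).items.foldl
      (fun d q => PySem.Dict.modify d q.1 [] (fun l => l ++ [(p.1, q.2)])) d) PySem.Dict.empty

def event_latest_time_alt (Graph : List (String × List (String × Int))) (topseq : List String) (eelast : Int) : List (String × Int) :=
  let pred := pvPred Graph
  let elF := topseq.reverse.foldl (fun el k =>
      (PySem.Dict.getD pred k []).foldl (pvRelax k) el) (pvInitEl topseq eelast)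
  elF.items

-- ===== PRECONDITION & SPEC =====
-- Pre_ excludes exactly the inputs on which A raises KeyError (el[key] for a Graph node 'key'
-- that has a successor listed in topseq but is itself not in topseq); B raises KeyError there too.
def Pre_event_latest_time (Graph : List (String × List (String × Int))) (topseq : List String) (eelast : Int) : Prop :=
  ∀ p ∈ (PySem.Dict.ofList Graph).items, (∃ t ∈ topseq, t ∈ p.2.map Prod.fst) → p.1 ∈ topseq
instance (Graph : List (String × List (String × Int))) (topseq : List String) (eelast : Int) : Decidable (Pre_event_latest_time Graph topseq eelast) := by unfold Pre_event_latest_time; infer_instance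

def pvWitness_event_latest_time : (List (String × List (String × Int))) × List String × Int :=
  ([("a", [("b", 3)]), ("b", [])], ["a", "b"], 10)

def Spec_event_latest_time (Graph : List (String × List (String × Int))) (topseq : List String) (eelast : Int) (out : List (String × Int)) : Prop := out = event_latest_time_alt Graph topseq eelast
instance (Graph : List (String × List (String × Int))) (topseq : List String) (eelast : Int) (out : List (String × Int)) : Decidable (Spec_event_latest_time Graph topseq eelast out) := by unfold Spec_event_latest_time; infer_instance

-- ===== CLAIM (what is proved, stated in full; the proofs are below) =====
def Claim_equal_event_latest_time : Prop := ∀ (Graph : List (String × List (String × Int))) (topseq : List String) (eelast : Int), Dom_event_latest_time Graph topseq eelast → Pre_event_latest_time Graph topseq eelast → Spec_event_latest_time Graph topseq eelast (event_latest_time Graph topseq eelast)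

-- ===== LEMMAS AND PROOFS =====

theorem pv_foldl_filterMap {α β γ : Type} (l : List α) (f : α → Option β) (g : γ → β → γ) (i : γ) :
    (l.filterMap f).foldl g i = l.foldl (fun a x => match f x with | some y => g a y | none => a) i := by
  induction l generalizing i with
  | nil => rfl
  | cons x t ih =>
    cases h : f x <;> simp [h, ih]

-- in a key-nodup assoc list, filtering for key k yields the (k, get? k) pair or nothing
theorem pv_filter_key_eq {ν : Type} (l : List (String × ν)) (h : (l.map Prod.fst).Nodup) (k : String) :
    l.filter (fun q => q.1 == k) =
      (match (PySem.Dict.mk l).get? k with | some v => [(k, v)] | none => []) := by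
  induction l with
  | nil => simp [PySem.Dict.get?]
  | cons q t ih =>
    simp only [List.map_cons, List.nodup_cons] at h
    rw [List.filter_cons, PySem.Dict.get?_mk_cons]
    by_cases hk : q.1 = k
    · subst hk
      simp only [beq_self_eq_true, if_true]
      have ht : t.filter (fun q' => q'.1 == q.1) = [] := by
        rw [List.filter_eq_nil_iff]
        intro a ha hc
        have he : a.1 = q.1 := by simpa using hc
        exact h.1 (List.mem_map.mpr ⟨a, ha, he⟩)
      simp [ht]
    · have : (q.1 == k) = false := by simp [hk]
      simp [this, ih h.2]

-- one Graph entry's contribution to the predecessor map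
theorem pv_pred_inner (u : String) (l : List (String × Int)) (d : PySem.Dict String (List (String × Int))) (k : String) :
    PySem.Dict.getD (l.foldl (fun d q => PySem.Dict.modify d q.1 [] (fun s => s ++ [(u, q.2)])) d) k []
      = PySem.Dict.getD d k [] ++ (l.filter (fun q => q.1 == k)).map (fun q => (u, q.2)) := by
  induction l generalizing d with
  | nil => simp
  | cons q t ih =>
    rw [List.foldl_cons, ih, List.filter_cons]
    by_cases hk : q.1 = k
    · subst hk
      simp [PySem.Dict.getD_modify_self]
    · have hb : (q.1 == k) = false := by simp [hk]
      rw [PySem.Dict.getD_modify, if_neg (fun e => hk e.symm)]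
      simp [hb]

-- the predecessor list of k collects, in Graph order, the entries whose successor dict contains k
theorem pv_pred_fold (L : List (String × List (String × Int))) (d : PySem.Dict String (List (String × Int))) (k : String) :
    PySem.Dict.getD (L.foldl (fun d p =>
        (PySem.Dict.ofList p.2).items.foldl
          (fun d q => PySem.Dict.modify d q.1 [] (fun s => s ++ [(p.1, q.2)])) d) d) k []
      = PySem.Dict.getD d k [] ++
        L.filterMap (fun p => (PySem.Dict.get? (PySem.Dict.ofList p.2) k).map (fun w => (p.1, w))) := by
  induction L generalizing d with
  | nil => simp
  | cons p t ih =>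
    rw [List.foldl_cons, ih, pv_pred_inner]
    have hnd : (((PySem.Dict.ofList p.2).items).map Prod.fst).Nodup := PySem.Dict.nodup_keys_ofList p.2
    rw [pv_filter_key_eq _ hnd k]
    cases h : (PySem.Dict.mk (PySem.Dict.ofList p.2).items).get? k with
    | none => simp_all
    | some v => simp_all

theorem pv_pred_getD (Graph : List (String × List (String × Int))) (k : String) :
    PySem.Dict.getD (pvPred Graph) k []
      = (PySem.Dict.ofList Graph).items.filterMap
          (fun p => (PySem.Dict.get? (PySem.Dict.ofList p.2) k).map (fun w => (p.1, w))) := by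
  unfold pvPred
  rw [pv_pred_fold]
  simp

-- for fixed k, A's scan over all Graph entries equals B's fold over pred[k]
theorem pv_inner_eq (Graph : List (String × List (String × Int))) (k : String) (el : PySem.Dict String Int) :
    (PySem.Dict.ofList Graph).items.foldl (fun el p =>
        if (PySem.Dict.get? (PySem.Dict.ofList p.2) k).isSome then
          let w := (PySem.Dict.get? (PySem.Dict.ofList ((PySem.Dict.get? (PySem.Dict.ofList Graph) p.1).getD [])) k).getD 0
          if PySem.Dict.getD el k 0 - w < PySem.Dict.getD el p.1 0 then
            PySem.Dict.insert el p.1 (PySem.Dict.getD el k 0 - w)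
          else el
        else el) el
      = (PySem.Dict.getD (pvPred Graph) k []).foldl (pvRelax k) el := by
  rw [pv_pred_getD, pv_foldl_filterMap]
  apply PySem.List.foldl_congr_mem
  intro acc p hp
  have hG : PySem.Dict.get? (PySem.Dict.ofList Graph) p.1 = some p.2 := by
    have := PySem.Dict.get?_of_mem_items (d := PySem.Dict.ofList Graph) (k := p.1) (v := p.2)
    exact this hp (PySem.Dict.nodup_keys_ofList Graph)
  cases h : PySem.Dict.get? (PySem.Dict.ofList p.2) k with
  | none => simp
  | some w => simp [h, hG, pvRelax]

theorem pv_ports_eq (Graph : List (String × List (String × Int))) (topseq : List String) (eelast : Int) :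
    event_latest_time Graph topseq eelast = event_latest_time_alt Graph topseq eelast := by
  unfold event_latest_time event_latest_time_alt
  have : (fun (el : PySem.Dict String Int) (k : String) =>
      (PySem.Dict.ofList Graph).items.foldl (fun el p =>
        if (PySem.Dict.get? (PySem.Dict.ofList p.2) k).isSome then
          let w := (PySem.Dict.get? (PySem.Dict.ofList ((PySem.Dict.get? (PySem.Dict.ofList Graph) p.1).getD [])) k).getD 0
          if PySem.Dict.getD el k 0 - w < PySem.Dict.getD el p.1 0 then
            PySem.Dict.insert el p.1 (PySem.Dict.getD el k 0 - w)
          else el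
        else el) el)
      = (fun el k => (PySem.Dict.getD (pvPred Graph) k []).foldl (pvRelax k) el) := by
    funext el k
    exact pv_inner_eq Graph k el
  simp only [this]

-- ===== VERDICT (by name: the statement is the Claim_ definition above) =====
theorem event_latest_time_spec : Claim_equal_event_latest_time := by
  intro Graph topseq eelast _ _
  unfold Spec_event_latest_time
  exact pv_ports_eq Graph topseq eelast
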